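-- pv_equiv track=rewrite | github.com/keemgdeok/Algorithm | 프로그래머스/2/42626. 더 맵게/더 맵게.py | solution
-- ===== SOURCE A (Python) =====
-- import heapq
--
-- def solution(scoville, K):
--     answer = 0
--
--     heapq.heapify(scoville)
--
--     while True:
--         if scoville[0] >= K:
--             return answer
--         if scoville[0] < K and len(scoville)==1:
--             return -1
--
--         first = heapq.heappop(scoville)
--         second = heapq.heappop(scoville)
--         heapq.heappush(scoville, first + 2*second)
--         answer+=1
-- ===== SOURCE B (Python) =====
-- from collections import deque
--
-- def solution(scoville, K):
--     # Two-queue merge instead of a priority structure.  Correctness of the FIFO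
--     # queue: each produced mix a + 2*b (a <= b the two current minima) is >= 3*a,
--     # while every previously produced mix was <= 3*(min at its time) <= 3*a, so
--     # mixes are produced in nondecreasing order and the queue head is their minimum.
--     xs = sorted(scoville)
--     n = len(xs)
--     mixes = deque()
--     i = 0
--     answer = 0
--
--     def pop_min():
--         nonlocal i
--         if i < n and (not mixes or xs[i] <= mixes[0]):
--             v = xs[i]
--             i += 1
--             return v
--         return mixes.popleft()
--
--     while True:
--         m = xs[i] if i < n and (not mixes or xs[i] <= mixes[0]) else mixes[0]
--         if m >= K:
--             return answer
--         if (n - i) + len(mixes) == 1: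
--             return -1
--         a = pop_min()
--         b = pop_min()
--         mixes.append(a + 2 * b)
--         answer += 1
-- ===== Notes on version B (the rewrite author's own statement) =====
-- stated objective: faster
-- what changed: B drops the priority structure entirely: it sorts once and then merges two FIFO queues (the sorted originals and the queue of produced mixes, which are provably produced in nondecreasing order), so each mix costs O(1) instead of O(log n) heap operations.
import Mathlib
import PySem

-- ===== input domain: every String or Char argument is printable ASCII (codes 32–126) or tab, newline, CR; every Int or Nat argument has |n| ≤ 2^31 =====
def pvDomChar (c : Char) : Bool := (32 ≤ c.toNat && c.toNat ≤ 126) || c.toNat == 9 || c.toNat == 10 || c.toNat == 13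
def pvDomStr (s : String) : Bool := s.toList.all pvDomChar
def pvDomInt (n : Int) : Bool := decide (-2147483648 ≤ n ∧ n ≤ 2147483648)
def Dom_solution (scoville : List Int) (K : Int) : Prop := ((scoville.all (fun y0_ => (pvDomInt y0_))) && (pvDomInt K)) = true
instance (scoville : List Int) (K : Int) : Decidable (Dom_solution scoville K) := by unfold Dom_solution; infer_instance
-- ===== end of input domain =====

-- B replaces the heap by a sort plus a two-FIFO-queue merge (mixes are produced in
-- nondecreasing order); equivalence is about the RETURN value only: A mutates
-- `scoville` in place into heap order, B does not mutate it.

-- ===== PORT A =====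
-- The heapq calls are ported by their documented contract on the list of elements:
-- after heapify the smallest element is at index 0, heappop removes and returns the
-- smallest element, heappush adds an element.  A's own loop, branches and arithmetic
-- are transliterated statement for statement.  The while-True loop becomes fuel
-- recursion; fuel = len(scoville) is enough because every iteration shrinks the list
-- by one and the loop returns at length 1 (0 is the out-of-fuel value, unreachable
-- under Pre_solution).
def heapMin (h : List Int) : Int := (h.min?).getD 0   -- scoville[0] of a heapified list

def heapPush (h : List Int) (v : Int) : List Int := h ++ [v]

def solutionLoop (h : List Int) (K : Int) (answer : Int) : Nat → Int
  | 0 => 0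
  | fuel + 1 =>
    if heapMin h ≥ K then answer
    else if heapMin h < K ∧ h.length = 1 then -1
    else
      let first := heapMin h
      let h1 := h.erase first                 -- heappop: remove the smallest
      let second := heapMin h1
      let h2 := h1.erase second               -- heappop again
      solutionLoop (heapPush h2 (first + 2 * second)) K (answer + 1) fuel

def solution (scoville : List Int) (K : Int) : Int :=
  solutionLoop scoville K 0 scoville.length

-- ===== PORT B =====
-- State: xs = not-yet-consumed tail of the sorted originals (the index i of Source B is
-- represented by dropping consumed heads), mixes = the FIFO queue of produced mixes.
-- bHead is Source B's conditional expression for the current minimum; bPop is pop_min.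
-- The empty-pool case (both queues empty) is where Source B raises IndexError (outside
-- Pre_solution); 0 is its unreachable placeholder value.
def bHead (xs mixes : List Int) : Int :=
  match xs, mixes with
  | x :: _, [] => x
  | x :: _, c :: _ => if x ≤ c then x else c
  | [], c :: _ => c
  | [], [] => 0

def bPop (xs mixes : List Int) : Int × List Int × List Int :=
  match xs, mixes with
  | x :: xt, [] => (x, xt, [])
  | x :: xt, c :: ct => if x ≤ c then (x, xt, c :: ct) else (c, x :: xt, ct)
  | [], c :: ct => (c, [], ct)
  | [], [] => (0, [], [])

def solutionAltLoop (K : Int) : List Int → List Int → Int → Nat → Int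
  | _, _, _, 0 => 0
  | xs, mixes, answer, fuel + 1 =>
    if bHead xs mixes ≥ K then answer
    else if xs.length + mixes.length = 1 then -1
    else
      let p := bPop xs mixes          -- a = pop_min()
      let q := bPop p.2.1 p.2.2       -- b = pop_min()
      solutionAltLoop K q.2.1 (q.2.2 ++ [p.1 + 2 * q.1]) (answer + 1) fuel

def solution_alt (scoville : List Int) (K : Int) : Int :=
  solutionAltLoop K (PySem.List.sorted scoville (fun v => v) false) [] 0 scoville.length

-- ===== PRECONDITION & SPEC =====
-- Pre_ excludes only the empty list, on which both Pythons raise IndexError.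
def Pre_solution (scoville : List Int) (K : Int) : Prop := scoville ≠ []
instance (scoville : List Int) (K : Int) : Decidable (Pre_solution scoville K) := by
  unfold Pre_solution; infer_instance

def pvWitness_solution : List Int × Int := ([1, 2, 3, 9, 10, 12], 7)

def Spec_solution (scoville : List Int) (K : Int) (out : Int) : Prop := out = solution_alt scoville K
instance (scoville : List Int) (K : Int) (out : Int) : Decidable (Spec_solution scoville K out) := by
  unfold Spec_solution; infer_instance

-- ===== CLAIM (what is proved, stated in full; the proofs are below) =====
def Claim_equal_solution : Prop := ∀ (scoville : List Int) (K : Int), Dom_solution scoville K → Pre_solution scoville K → Spec_solution scoville K (solution scoville K)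

-- ===== LEMMAS AND PROOFS =====

-- The invariant tying A's heap state h to B's two queues: h ~ xs ++ mixes, both
-- queues sorted, every mix ≤ 3 * (every remaining original), and every later mix
-- ≤ 3 * (every earlier mix).  These give mix ≤ 3 * (popped minimum) ≤ min + 2*second,
-- so the queue head is always the least mix and appending keeps it sorted.
def InvAB (h xs mixes : List Int) : Prop :=
  h.Perm (xs ++ mixes) ∧ xs.Pairwise (· ≤ ·) ∧ mixes.Pairwise (· ≤ ·) ∧
    (∀ e ∈ mixes, ∀ z ∈ xs, e ≤ 3 * z) ∧ mixes.Pairwise (fun x y => y ≤ 3 * x)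

theorem bHead_mem (xs mixes : List Int) (hne : xs ++ mixes ≠ []) :
    bHead xs mixes ∈ xs ++ mixes := by
  cases xs with
  | nil =>
    cases mixes with
    | nil => simp at hne
    | cons c ct => simp [bHead]
  | cons x xt =>
    cases mixes with
    | nil => simp [bHead]
    | cons c ct =>
      simp only [bHead]
      split <;> simp

theorem bHead_le (xs mixes : List Int) (hx : xs.Pairwise (· ≤ ·))
    (hm : mixes.Pairwise (· ≤ ·)) : ∀ z ∈ xs ++ mixes, bHead xs mixes ≤ z := by
  intro z hz
  cases xs with
  | nil =>
    cases mixes with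
    | nil => simp at hz
    | cons c ct =>
      simp only [List.nil_append] at hz
      rcases List.mem_cons.1 hz with h | h
      · simp [bHead, h]
      · simpa [bHead] using (List.pairwise_cons.1 hm).1 z h
  | cons x xt =>
    cases mixes with
    | nil =>
      simp only [List.append_nil] at hz
      rcases List.mem_cons.1 hz with h | h
      · simp [bHead, h]
      · simpa [bHead] using (List.pairwise_cons.1 hx).1 z h
    | cons c ct =>
      simp only [bHead]
      rcases List.mem_append.1 hz with h | h
      · rcases List.mem_cons.1 h with h | h
        · subst h; split <;> omega
        · have := (List.pairwise_cons.1 hx).1 z h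
          split <;> omega
      · rcases List.mem_cons.1 h with h | h
        · subst h; split <;> omega
        · have := (List.pairwise_cons.1 hm).1 z h
          split <;> omega

theorem heapMin_eq_bHead (h xs mixes : List Int) (hp : h.Perm (xs ++ mixes))
    (hx : xs.Pairwise (· ≤ ·)) (hm : mixes.Pairwise (· ≤ ·)) (hne : xs ++ mixes ≠ []) :
    heapMin h = bHead xs mixes := by
  have hmem : bHead xs mixes ∈ h := hp.mem_iff.2 (bHead_mem xs mixes hne)
  have hle : ∀ b ∈ h, bHead xs mixes ≤ b := fun b hb =>
    bHead_le xs mixes hx hm b (hp.mem_iff.1 hb)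
  have : h.min? = some (bHead xs mixes) := List.min?_eq_some_iff.2 ⟨hmem, hle⟩
  simp [heapMin, this]

-- bPop removes exactly one occurrence of the minimum: its value is bHead and the
-- remaining queues concatenate to (xs ++ mixes).erase (bHead xs mixes).
theorem bPop_spec (xs mixes : List Int) (hx : xs.Pairwise (· ≤ ·)) (hne : xs ++ mixes ≠ []) :
    (bPop xs mixes).1 = bHead xs mixes ∧
    (bPop xs mixes).2.1 ++ (bPop xs mixes).2.2 = (xs ++ mixes).erase (bHead xs mixes) := by
  cases xs with
  | nil =>
    cases mixes with
    | nil => simp at hne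
    | cons c ct => simp [bPop, bHead]
  | cons x xt =>
    cases mixes with
    | nil => simp [bPop, bHead]
    | cons c ct =>
      by_cases hxc : x ≤ c
      · simp [bPop, bHead, hxc]
      · have hnotin : c ∉ x :: xt := by
          intro hc
          rcases List.mem_cons.1 hc with h | h
          · omega
          · have := (List.pairwise_cons.1 hx).1 c h; omega
        refine ⟨by simp [bPop, bHead, hxc], ?_⟩
        simp only [bPop, bHead, if_neg hxc]
        rw [List.erase_append_right _ hnotin, List.erase_cons_head]

theorem bPop_sorted (xs mixes : List Int) (hx : xs.Pairwise (· ≤ ·))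
    (hm : mixes.Pairwise (· ≤ ·)) :
    (bPop xs mixes).2.1.Pairwise (· ≤ ·) ∧ (bPop xs mixes).2.2.Pairwise (· ≤ ·) := by
  cases xs with
  | nil =>
    cases mixes with
    | nil => simp [bPop]
    | cons c ct => exact ⟨by simp [bPop], by simpa [bPop] using (List.pairwise_cons.1 hm).2⟩
  | cons x xt =>
    cases mixes with
    | nil => exact ⟨by simpa [bPop] using (List.pairwise_cons.1 hx).2, by simp [bPop]⟩
    | cons c ct =>
      by_cases hxc : x ≤ c
      · exact ⟨by simpa [bPop, hxc] using (List.pairwise_cons.1 hx).2,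
          by simpa [bPop, hxc] using hm⟩
      · exact ⟨by simpa [bPop, hxc] using hx,
          by simpa [bPop, hxc] using (List.pairwise_cons.1 hm).2⟩

theorem bPop_mixes_sub (xs mixes : List Int) :
    ∀ e ∈ (bPop xs mixes).2.2, e ∈ mixes := by
  cases xs with
  | nil => cases mixes with
    | nil => simp [bPop]
    | cons c ct => intro e he; simp only [bPop] at he; exact List.mem_cons_of_mem _ he
  | cons x xt =>
    cases mixes with
    | nil => simp [bPop]
    | cons c ct =>
      by_cases hxc : x ≤ c
      · intro e he; simpa [bPop, hxc] using he
      · intro e he; simp only [bPop, if_neg hxc] at he; exact List.mem_cons_of_mem _ he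

theorem bPop_mixes_sublist (xs mixes : List Int) : (bPop xs mixes).2.2.Sublist mixes := by
  cases xs with
  | nil => cases mixes with
    | nil => simp [bPop]
    | cons c ct => simpa [bPop] using List.sublist_cons_self c ct
  | cons x xt =>
    cases mixes with
    | nil => simp [bPop]
    | cons c ct =>
      by_cases hxc : x ≤ c
      · simp [bPop, hxc]
      · simpa [bPop, hxc] using List.sublist_cons_self c ct

theorem bPop_xs_sublist (xs mixes : List Int) : (bPop xs mixes).2.1.Sublist xs := by
  cases xs with
  | nil => cases mixes with
    | nil => simp [bPop]
    | cons c ct => simp [bPop]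
  | cons x xt =>
    cases mixes with
    | nil => simpa [bPop] using List.sublist_cons_self x xt
    | cons c ct =>
      by_cases hxc : x ≤ c
      · simpa [bPop, hxc] using List.sublist_cons_self x xt
      · simp [bPop, hxc]

-- any mix surviving a pop is ≤ 3 * the popped minimum
theorem le3_bHead (xs mixes : List Int)
    (h4 : ∀ e ∈ mixes, ∀ z ∈ xs, e ≤ 3 * z)
    (h5 : mixes.Pairwise (fun x y => y ≤ 3 * x)) :
    ∀ e ∈ (bPop xs mixes).2.2, e ≤ 3 * bHead xs mixes := by
  intro e he
  cases xs with
  | nil =>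
    cases mixes with
    | nil => simp [bPop] at he
    | cons c ct =>
      simp only [bPop] at he
      simpa [bHead] using (List.pairwise_cons.1 h5).1 e he
  | cons x xt =>
    cases mixes with
    | nil => simp [bPop] at he
    | cons c ct =>
      by_cases hxc : x ≤ c
      · simp only [bPop, if_pos hxc] at he
        simpa [bHead, hxc] using h4 e he x (by simp)
      · simp only [bPop, if_neg hxc] at he
        simpa [bHead, hxc] using (List.pairwise_cons.1 h5).1 e he

-- the main loop simulation
theorem loop_eq : ∀ (fuel : Nat) (h xs mixes : List Int) (K ans : Int),
    InvAB h xs mixes → xs ++ mixes ≠ [] →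
    solutionLoop h K ans fuel = solutionAltLoop K xs mixes ans fuel := by
  intro fuel
  induction fuel with
  | zero => intro h xs mixes K ans _ _; rfl
  | succ fuel ih =>
    intro h xs mixes K ans hinv hne
    obtain ⟨hp, hx, hm, h4, h5⟩ := hinv
    have hmin : heapMin h = bHead xs mixes := heapMin_eq_bHead h xs mixes hp hx hm hne
    have hlen : h.length = xs.length + mixes.length := by simpa using hp.length_eq
    have stepA : solutionLoop h K ans (fuel + 1) =
        if heapMin h ≥ K then ans
        else if heapMin h < K ∧ h.length = 1 then -1
        else solutionLoop
          (heapPush ((h.erase (heapMin h)).erase (heapMin (h.erase (heapMin h))))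
            (heapMin h + 2 * heapMin (h.erase (heapMin h)))) K (ans + 1) fuel := rfl
    have stepB : solutionAltLoop K xs mixes ans (fuel + 1) =
        if bHead xs mixes ≥ K then ans
        else if xs.length + mixes.length = 1 then -1
        else solutionAltLoop K (bPop (bPop xs mixes).2.1 (bPop xs mixes).2.2).2.1
          ((bPop (bPop xs mixes).2.1 (bPop xs mixes).2.2).2.2
            ++ [(bPop xs mixes).1 + 2 * (bPop (bPop xs mixes).2.1 (bPop xs mixes).2.2).1])
          (ans + 1) fuel := rfl
    rw [stepA, stepB, hmin]
    by_cases hK : bHead xs mixes ≥ K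
    · rw [if_pos hK, if_pos hK]
    · rw [if_neg hK, if_neg hK]
      by_cases h1 : xs.length + mixes.length = 1
      · rw [if_pos (by constructor <;> omega), if_pos h1]
      · rw [if_neg (by rw [hlen]; intro hc; exact h1 hc.2), if_neg h1]
        -- pool has ≥ 2 elements; both sides pop the two minima
        obtain ⟨ha1, he1⟩ := bPop_spec xs mixes hx hne
        have hp1 : (h.erase (bHead xs mixes)).Perm ((bPop xs mixes).2.1 ++ (bPop xs mixes).2.2) := by
          rw [he1]; exact hp.erase _
        have hs1 := bPop_sorted xs mixes hx hm
        have hlen1 : ((bPop xs mixes).2.1 ++ (bPop xs mixes).2.2).length + 1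
            = xs.length + mixes.length := by
          rw [he1]
          have hmem : bHead xs mixes ∈ xs ++ mixes := bHead_mem xs mixes hne
          rw [List.length_erase_of_mem hmem]
          have : 1 ≤ (xs ++ mixes).length := List.length_pos_iff.2 hne
          simp at this ⊢
          omega
        have hne1 : (bPop xs mixes).2.1 ++ (bPop xs mixes).2.2 ≠ [] := by
          intro hcon
          rw [hcon] at hlen1; simp at hlen1; omega
        obtain ⟨ha2, he2⟩ := bPop_spec (bPop xs mixes).2.1 (bPop xs mixes).2.2 hs1.1 hne1
        have hs2 := bPop_sorted (bPop xs mixes).2.1 (bPop xs mixes).2.2 hs1.1 hs1.2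
        set a := bHead xs mixes with hadef
        set b := bHead (bPop xs mixes).2.1 (bPop xs mixes).2.2 with hbdef
        set xs2 := (bPop (bPop xs mixes).2.1 (bPop xs mixes).2.2).2.1 with hxs2
        set m2 := (bPop (bPop xs mixes).2.1 (bPop xs mixes).2.2).2.2 with hm2
        have hmin1 : heapMin (h.erase a) = b := heapMin_eq_bHead _ _ _ hp1 hs1.1 hs1.2 hne1
        have hp2 : ((h.erase a).erase b).Perm (xs2 ++ m2) := by
          rw [he2]; exact hp1.erase b
        have hamem : a ∈ xs ++ mixes := bHead_mem xs mixes hne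
        have hale : ∀ z ∈ xs ++ mixes, a ≤ z := bHead_le xs mixes hx hm
        have hbmem : b ∈ (bPop xs mixes).2.1 ++ (bPop xs mixes).2.2 := bHead_mem _ _ hne1
        have hble : ∀ z ∈ (bPop xs mixes).2.1 ++ (bPop xs mixes).2.2, b ≤ z :=
          bHead_le _ _ hs1.1 hs1.2
        have hrem_sub : ∀ z ∈ (bPop xs mixes).2.1 ++ (bPop xs mixes).2.2, z ∈ xs ++ mixes := by
          intro z hz; rw [he1] at hz; exact List.mem_of_mem_erase hz
        have hrem2_sub : ∀ z ∈ xs2 ++ m2, z ∈ (bPop xs mixes).2.1 ++ (bPop xs mixes).2.2 := by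
          intro z hz; rw [he2] at hz; exact List.mem_of_mem_erase hz
        have hab : a ≤ b := hale b (hrem_sub b hbmem)
        have hm2sub : ∀ e ∈ m2, e ∈ (bPop xs mixes).2.2 := fun e he =>
          bPop_mixes_sub (bPop xs mixes).2.1 (bPop xs mixes).2.2 e he
        have hble2 : ∀ z ∈ xs2 ++ m2, b ≤ z := fun z hz => hble z (hrem2_sub z hz)
        have he3a : ∀ e ∈ m2, e ≤ 3 * a := fun e he =>
          le3_bHead xs mixes h4 h5 e (hm2sub e he)
        have hxs2sub : ∀ z ∈ xs2, z ∈ xs := fun z hz =>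
          (bPop_xs_sublist xs mixes).mem ((bPop_xs_sublist (bPop xs mixes).2.1 (bPop xs mixes).2.2).mem hz)
        have hInv' : InvAB (heapPush ((h.erase a).erase b) (a + 2 * b)) xs2 (m2 ++ [a + 2 * b]) := by
          refine ⟨(hp2.append_right [a + 2 * b]).trans (by simp), hs2.1, ?_, ?_, ?_⟩
          · -- the queue stays sorted: every surviving mix e ≤ 3a ≤ a + 2b
            refine List.pairwise_append.2 ⟨hs2.2, by simp, ?_⟩
            intro e he z hz
            simp only [List.mem_singleton] at hz
            subst hz
            have := he3a e he
            omega
          · -- every mix ≤ 3 * every remaining original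
            intro e he z hz
            rcases List.mem_append.1 he with he | he
            · exact h4 e (bPop_mixes_sub xs mixes e (hm2sub e he)) z (hxs2sub z hz)
            · simp only [List.mem_singleton] at he
              subst he
              have := hble2 z (List.mem_append.2 (Or.inl hz))
              omega
          · -- every later mix ≤ 3 * every earlier mix
            refine List.pairwise_append.2 ⟨?_, by simp, ?_⟩
            · exact h5.sublist ((bPop_mixes_sublist (bPop xs mixes).2.1 (bPop xs mixes).2.2).trans
                (bPop_mixes_sublist xs mixes))
            · intro e he z hz
              simp only [List.mem_singleton] at hz
              subst hz
              have := hble2 e (List.mem_append.2 (Or.inr he))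
              omega
        rw [hmin1, ha1, ha2]
        exact ih _ xs2 (m2 ++ [a + 2 * b]) K (ans + 1) hInv' (by simp)

-- ===== VERDICT (by name: the statement is the Claim_ definition above) =====
theorem solution_spec : Claim_equal_solution := by
  intro scoville K _ hpre
  unfold Spec_solution solution solution_alt
  have hp : (PySem.List.sorted scoville (fun v => v) false).Perm scoville :=
    PySem.List.sorted_perm scoville (fun v => v) false
  refine loop_eq scoville.length scoville (PySem.List.sorted scoville (fun v => v) false) [] K 0
    ⟨by simpa using hp.symm, ?_, by simp, by simp, by simp⟩ ?_
  · simpa using PySem.List.sorted_pairwise (xs := scoville) (key := fun v => v)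
  · simp only [List.append_nil]
    intro hnil
    apply hpre
    have := hp.length_eq
    rw [hnil] at this
    exact List.eq_nil_of_length_eq_zero (by simpa using this.symm)
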